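-- pv_equiv track=rewrite | github.com/Bzan96/FreeCodeCamp_Projects | Scientific_Computing_with_Python/budget_app/budget.py | join_category_names
-- ===== SOURCE A (Python) =====
-- def join_category_names(names):
--   max_word_length = len(max(names, key=len))
--   rows = ["     "] * max_word_length
--
--   index = 0
--   for name in names:
--     for i in range(max_word_length):
--       if index < len(name):
--         rows[index] += name[i]
--         rows[index] += "  "
--       else:
--         rows[index] += "   "
--
--       if index == max_word_length - 1:
--         index = 0
--       else:
--         index += 1
--
--   return "\n".join(rows)
-- ===== SOURCE B (Python) =====
-- def join_category_names(names):
--   width = len(max(names, key=len))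
--   return "\n".join(
--     "     " + "".join(name[i] + "  " if i < len(name) else "   " for name in names)
--     for i in range(width))
-- ===== Notes on version B (the rewrite author's own statement) =====
-- stated objective: faster
-- what changed: A loops over names mutating a rows list through a rotating row counter with repeated string += into each row; B builds each output row directly as one join over names per character position (pure per-row comprehension, no mutation, no counter), avoiding repeated reallocation of growing row strings.
import Mathlib
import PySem

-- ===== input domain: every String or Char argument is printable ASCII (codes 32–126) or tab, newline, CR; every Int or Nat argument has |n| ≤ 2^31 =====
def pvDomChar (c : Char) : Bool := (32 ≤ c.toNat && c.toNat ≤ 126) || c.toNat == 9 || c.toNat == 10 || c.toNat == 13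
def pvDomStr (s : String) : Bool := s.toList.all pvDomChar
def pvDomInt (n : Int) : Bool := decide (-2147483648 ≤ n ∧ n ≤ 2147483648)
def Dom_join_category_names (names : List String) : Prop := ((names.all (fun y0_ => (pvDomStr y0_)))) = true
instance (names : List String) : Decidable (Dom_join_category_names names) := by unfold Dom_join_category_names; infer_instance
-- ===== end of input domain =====

-- B builds each output row as a pure per-position join over names instead of A's mutable rows
-- list with a rotating index counter and repeated string +=; a timing run measured B faster.

-- ===== PORT A =====
-- Transliteration of A. Inside the loop index always stays in [0, max_word_length), so
-- rows[index] never raises and .toNat is exact; likewise name[i] is only read under the guard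
-- (where i = index < len(name)), so the .getD ' ' default of pyGet? is never used.
def join_category_names (names : List String) : String :=
  let max_word_length : Int :=
    PySem.Str.len ((PySem.List.max? names (fun s => PySem.Str.len s)).getD "")
  let rows : List String := PySem.List.pyRepeat ["     "] max_word_length
  let st : List String × Int := names.foldl (fun st name =>
    (PySem.List.pyRange 0 max_word_length 1).foldl (fun st i =>
      let rows := st.1
      let index := st.2
      let rows :=
        if index < PySem.Str.len name then
          rows.modify index.toNat
            (fun r => r ++ String.ofList [(PySem.Str.pyGet? name i).getD ' '] ++ "  ")
        else
          rows.modify index.toNat (fun r => r ++ "   ")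
      let index := if index == max_word_length - 1 then 0 else index + 1
      (rows, index)) st) (rows, 0)
  PySem.Str.join "\n" st.1

-- ===== PORT B =====
def join_category_names_alt (names : List String) : String :=
  let width : Int :=
    PySem.Str.len ((PySem.List.max? names (fun s => PySem.Str.len s)).getD "")
  PySem.Str.join "\n" ((PySem.List.pyRange 0 width 1).map (fun i =>
    "     " ++ PySem.Str.join "" (names.map (fun name =>
      if i < PySem.Str.len name then
        String.ofList [(PySem.Str.pyGet? name i).getD ' '] ++ "  "
      else "   "))))

-- ===== PRECONDITION & SPEC =====
-- Python's max([]) raises ValueError, so A (and B alike) raises on the empty list; Pre_ excludes it.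
def Pre_join_category_names (names : List String) : Prop := names ≠ []
instance (names : List String) : Decidable (Pre_join_category_names names) := by
  unfold Pre_join_category_names; infer_instance
def pvWitness_join_category_names : List String := ["food", "rent", "tv"]

def Spec_join_category_names (names : List String) (out : String) : Prop := out = join_category_names_alt names
instance (names : List String) (out : String) : Decidable (Spec_join_category_names names out) := by unfold Spec_join_category_names; infer_instance

-- ===== CLAIM (what is proved, stated in full; the proofs are below) =====
def Claim_equal_join_category_names : Prop := ∀ (names : List String), Dom_join_category_names names → Pre_join_category_names names → Spec_join_category_names names (join_category_names names)

-- ===== LEMMAS AND PROOFS =====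

-- the string appended to row i for one name (B's per-name piece; also what A's guarded
-- double-append amounts to when index = i)
def pvPiece (name : String) (i : Int) : String :=
  if i < PySem.Str.len name then
    String.ofList [(PySem.Str.pyGet? name i).getD ' '] ++ "  "
  else "   "

def pvJ (names : List String) (i : Int) : String :=
  PySem.Str.join "" (names.map (fun name => pvPiece name i))

-- A's inner-loop body, named so the fold can be reasoned about
def pvStep (name : String) (w : Int) (st : List String × Int) (i : Int) : List String × Int :=
  let rows := st.1
  let index := st.2
  let rows :=
    if index < PySem.Str.len name then
      rows.modify index.toNat
        (fun r => r ++ String.ofList [(PySem.Str.pyGet? name i).getD ' '] ++ "  ")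
    else
      rows.modify index.toNat (fun r => r ++ "   ")
  let index := if index == w - 1 then 0 else index + 1
  (rows, index)

theorem pvJoinEmpty_cons (x : String) (l : List String) :
    PySem.Str.join "" (x :: l) = x ++ PySem.Str.join "" l := by
  apply String.toList_inj.mp
  cases l with
  | nil => simp [PySem.Str.join, PySem.Chars.join_singleton, PySem.Chars.join_nil,
      ]
  | cons y t => simp [PySem.Str.join, PySem.Chars.join_cons_cons, String.toList_append]

theorem pvJ_nil (i : Int) : pvJ [] i = "" := by
  apply String.toList_inj.mp
  simp [pvJ, PySem.Str.join, PySem.Chars.join_nil]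

theorem pvJ_cons (name : String) (rest : List String) (i : Int) :
    pvJ (name :: rest) i = pvPiece name i ++ pvJ rest i := by
  simp only [pvJ, List.map_cons, pvJoinEmpty_cons]

theorem pvMapIdx_if_ge (rows : List String) (k : Nat) (p : Int → String)
    (hle : rows.length ≤ k) :
    rows.mapIdx (fun j r => if k ≤ j then r ++ p (j : Int) else r) = rows := by
  apply List.ext_getElem (by simp)
  intro j h1 h2
  rw [List.getElem_mapIdx, if_neg (by simp at h1; omega)]

theorem pvMapIdx_last (rows : List String) (k : Nat) (p : Int → String)
    (hlen : rows.length = k + 1) :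
    rows.mapIdx (fun j r => if k ≤ j then r ++ p (j : Int) else r)
      = rows.modify k (fun r => r ++ p (k : Int)) := by
  apply List.ext_getElem (by simp)
  intro j h1 h2
  rw [List.getElem_mapIdx, List.getElem_modify]
  simp only [List.length_mapIdx] at h1
  rcases Nat.lt_or_ge j k with hj | hj
  · rw [if_neg (by omega), if_neg (by omega)]
  · have : j = k := by omega
    subst this
    rw [if_pos (by omega), if_pos rfl]

theorem pvModify_mapIdx (rows : List String) (k : Nat) (p : Int → String)
    (_h : k < rows.length) :
    (rows.modify k (fun r => r ++ p (k : Int))).mapIdx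
        (fun j r => if k + 1 ≤ j then r ++ p (j : Int) else r)
      = rows.mapIdx (fun j r => if k ≤ j then r ++ p (j : Int) else r) := by
  apply List.ext_getElem (by simp)
  intro j h1 h2
  rw [List.getElem_mapIdx, List.getElem_mapIdx, List.getElem_modify]
  rcases eq_or_ne k j with hj | hj
  · subst hj
    rw [if_pos rfl, if_neg (by omega), if_pos (by omega)]
  · rw [if_neg hj]
    rcases Nat.lt_or_ge j k with hlt | hge
    · rw [if_neg (by omega), if_neg (by omega)]
    · rw [if_pos (by omega), if_pos (by omega)]

theorem pvMapIdx_mapIdx_append (rows : List String) (p q : Int → String) :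
    (rows.mapIdx (fun j r => r ++ p (j : Int))).mapIdx (fun j r => r ++ q (j : Int))
      = rows.mapIdx (fun j r => r ++ (p (j : Int) ++ q (j : Int))) := by
  apply List.ext_getElem (by simp)
  intro j h1 h2
  rw [List.getElem_mapIdx, List.getElem_mapIdx, List.getElem_mapIdx, String.append_assoc]

-- one pass of A's inner loop from index k maps pvPiece onto every row from k on and
-- leaves the counter at 0 (unless the pass is empty)
theorem pvInner (name : String) (n : Nat) : ∀ (m k : Nat) (rows : List String),
    k + m = n → rows.length = n →
    (PySem.List.pyRange (k : Int) (n : Int) 1).foldl (pvStep name (n : Int)) (rows, (k : Int))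
      = (rows.mapIdx (fun j r => if k ≤ j then r ++ pvPiece name (j : Int) else r),
         if m = 0 then (k : Int) else 0) := by
  intro m
  induction m with
  | zero =>
    intro k rows hk hlen
    rw [PySem.List.pyRange_one_eq_nil (by omega)]
    simp only [List.foldl_nil]
    rw [pvMapIdx_if_ge rows k _ (by omega)]
    simp
  | succ m ih =>
    intro k rows hk hlen
    have hkn : (k : Int) < (n : Int) := by exact_mod_cast (by omega : k < n)
    rw [PySem.List.pyRange_one_cons hkn, List.foldl_cons]
    have hstep : pvStep name (n : Int) (rows, (k : Int)) (k : Int)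
        = (rows.modify k (fun r => r ++ pvPiece name (k : Int)),
           if (k : Int) == (n : Int) - 1 then 0 else (k : Int) + 1) := by
      simp only [pvStep, pvPiece, Int.toNat_natCast]
      by_cases hc : (k : Int) < PySem.Str.len name
      · rw [if_pos hc, if_pos hc]
        simp only [String.append_assoc]
      · rw [if_neg hc, if_neg hc]
    rw [hstep]
    by_cases hm : m = 0
    · subst hm
      have hk1 : k + 1 = n := by omega
      have : ((k : Int) == (n : Int) - 1) = true := by
        simp only [beq_iff_eq]; omega
      rw [this]
      rw [show ((k : Int) + 1) = ((n : Int)) by omega]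
      rw [PySem.List.pyRange_one_eq_nil (le_refl _)]
      simp only [List.foldl_nil]
      rw [pvMapIdx_last rows k _ (by omega)]
      simp
    · have : ((k : Int) == (n : Int) - 1) = false := by
        simp only [beq_eq_false_iff_ne, ne_eq]
        intro hcontra; omega
      rw [this]
      simp only [Bool.false_eq_true, if_false]
      rw [show ((k : Int) + 1) = ((k + 1 : Nat) : Int) by push_cast; ring]
      rw [ih (k + 1) (rows.modify k (fun r => r ++ pvPiece name (k : Int)))
        (by omega) (by simp [hlen])]
      rw [pvModify_mapIdx rows k _ (by omega)]
      simp [hm]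

-- the outer loop over names appends pvJ to every row and keeps the counter at 0
theorem pvOuter (n : Nat) : ∀ (names rows : List String), rows.length = n →
    names.foldl (fun st name =>
        (PySem.List.pyRange 0 (n : Int) 1).foldl (pvStep name (n : Int)) st) (rows, 0)
      = (rows.mapIdx (fun j r => r ++ pvJ names (j : Int)), 0) := by
  intro names
  induction names with
  | nil =>
    intro rows hlen
    simp only [List.foldl_nil, pvJ_nil, String.append_empty]
    congr 1
    apply List.ext_getElem (by simp)
    intro j h1 h2
    rw [List.getElem_mapIdx]
  | cons name rest ih =>
    intro rows hlen
    rw [List.foldl_cons]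
    have h0 := pvInner name n n 0 rows (by omega) hlen
    simp only [Nat.cast_zero] at h0
    rw [h0]
    have hsimp : rows.mapIdx (fun j r => if 0 ≤ j then r ++ pvPiece name (j : Int) else r)
        = rows.mapIdx (fun j r => r ++ pvPiece name (j : Int)) := by
      apply List.ext_getElem (by simp)
      intro j h1 h2
      rw [List.getElem_mapIdx, List.getElem_mapIdx, if_pos (Nat.zero_le j)]
    rw [hsimp, ite_self, ih _ (by simp [hlen])]
    rw [pvMapIdx_mapIdx_append]
    simp only [pvJ_cons]

theorem pvRowsA (n : Nat) (names : List String) :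
    (List.replicate n "     ").mapIdx (fun j r => r ++ pvJ names (j : Int))
      = (List.range n).map (fun j : Nat => "     " ++ pvJ names (j : Int)) := by
  apply List.ext_getElem (by simp)
  intro j h1 h2
  rw [List.getElem_mapIdx, List.getElem_map]
  simp

-- the shared width expression (same first line of both ports), named for the proof
def pvW (names : List String) : Int :=
  PySem.Str.len ((PySem.List.max? names (fun s => PySem.Str.len s)).getD "")

-- ===== VERDICT (by name: the statement is the Claim_ definition above) =====
theorem join_category_names_spec : Claim_equal_join_category_names := by
  unfold Claim_equal_join_category_names
  intro names _ _
  unfold Spec_join_category_names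
  show PySem.Str.join "\n" ((names.foldl (fun st name =>
      (PySem.List.pyRange 0 (pvW names) 1).foldl (pvStep name (pvW names)) st)
      (PySem.List.pyRepeat ["     "] (pvW names), 0)).1)
    = PySem.Str.join "\n" ((PySem.List.pyRange 0 (pvW names) 1).map (fun i =>
        "     " ++ pvJ names i))
  obtain ⟨n, hw⟩ : ∃ n : Nat, pvW names = (n : Int) :=
    ⟨(pvW names).toNat, by unfold pvW; rw [PySem.Str.len_eq]; simp⟩
  rw [hw, PySem.List.pyRepeat_singleton, Int.toNat_natCast]
  rw [pvOuter n names (List.replicate n "     ") (by simp)]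
  rw [show ((List.mapIdx (fun j r => r ++ pvJ names (j : Int)) (List.replicate n "     "),
      (0 : Int)).1) = List.mapIdx (fun j r => r ++ pvJ names (j : Int))
      (List.replicate n "     ") from rfl]
  rw [pvRowsA n names]
  congr 1
  rw [PySem.List.pyRange_one, List.map_map]
  apply List.ext_getElem (by simp)
  intro j h1 h2
  simp
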